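-- pv_equiv track=rewrite | github.com/malk1510/CAD-Tools-for-VLSI-Design | espresso.py | find_weights
-- ===== SOURCE A (Python) =====
-- def find_weights(f):
-- 	sums = []
-- 	weights = []
-- 	for i in range(len(f[0])):
-- 		sm = 0
-- 		for j in range(len(f)):
-- 			sm += f[j][i]
-- 		sums.append(sm)
-- 	for i in range(len(f)):
-- 		sm = 0
-- 		for j in f[i]:
-- 			sm += j*sums[i]
-- 		weights.append(sm)
-- 	return weights
-- ===== SOURCE B (Python) =====
-- def find_weights(f):
--     n = len(f)
--     return [sum(x * f[k][i] for x in f[i] for k in range(n)) for i in range(n)]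
-- ===== Notes on version B (the rewrite author's own statement) =====
-- stated objective: alternative
-- what changed: B computes each weight directly as a brute-force double sum of products f[i][j]*f[k][i] (correct by distributivity), eliminating A's precomputed column-sums array and its two staged passes.
import Mathlib
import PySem

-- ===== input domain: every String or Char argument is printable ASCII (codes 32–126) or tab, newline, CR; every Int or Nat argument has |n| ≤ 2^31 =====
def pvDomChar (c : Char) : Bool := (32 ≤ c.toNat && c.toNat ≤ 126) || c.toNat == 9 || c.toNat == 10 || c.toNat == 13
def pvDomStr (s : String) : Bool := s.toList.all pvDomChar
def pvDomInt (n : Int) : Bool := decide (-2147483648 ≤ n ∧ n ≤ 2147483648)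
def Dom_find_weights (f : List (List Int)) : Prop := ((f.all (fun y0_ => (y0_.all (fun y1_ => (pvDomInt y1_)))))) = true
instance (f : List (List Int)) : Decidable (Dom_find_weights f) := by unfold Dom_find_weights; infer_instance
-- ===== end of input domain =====

-- B replaces A's staged passes (column-sums array, then per-row multiply-accumulate) by a
-- direct brute-force double sum of products per weight (alternative decomposition, not faster).

-- ===== PORT A =====
-- literal transliteration: first loop builds `sums` (column sums), second loop builds
-- `weights` by adding j*sums[i] element by element; indexing rendered with getD
-- (exact on Pre_, which excludes every IndexError of the Python).
def find_weights (f : List (List Int)) : List Int :=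
  let sums : List Int :=
    (List.range (f.getD 0 []).length).foldl
      (fun sums i =>
        sums ++ [(List.range f.length).foldl
          (fun sm j => sm + (f.getD j []).getD i 0) 0]) []
  (List.range f.length).foldl
    (fun weights i =>
      weights ++ [(f.getD i []).foldl (fun sm j => sm + j * sums.getD i 0) 0]) []

-- ===== PORT B =====
-- literal transliteration of Source B: one comprehension over i in range(n); each weight is the
-- double generator sum over x in f[i] and k in range(n) of x * f[k][i]
-- (in-range indexing rendered with getD, exact on Pre_).
def find_weights_alt (f : List (List Int)) : List Int :=
  let n := f.length
  (List.range n).map (fun i =>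
    ((f.getD i []).map (fun x =>
      ((List.range n).map (fun k => x * (f.getD k []).getD i 0)).sum)).sum)

-- ===== PRECONDITION & SPEC =====
-- Pre_ = exactly the inputs on which Python A returns normally: f nonempty, every row at
-- least as long as row 0 (else the first loop's f[j][i] raises IndexError), and every
-- NONEMPTY row's index below len(f[0]) (else sums[i] raises IndexError in the second loop).
def Pre_find_weights (f : List (List Int)) : Prop :=
  f ≠ [] ∧ (∀ r ∈ f, (f.getD 0 []).length ≤ r.length) ∧
  (∀ i < f.length, f.getD i [] ≠ [] → i < (f.getD 0 []).length)
instance (f : List (List Int)) : Decidable (Pre_find_weights f) := by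
  unfold Pre_find_weights; infer_instance

def pvWitness_find_weights : List (List Int) := [[1, 2], [3, 4]]

def Spec_find_weights (f : List (List Int)) (out : List Int) : Prop := out = find_weights_alt f
instance (f : List (List Int)) (out : List Int) : Decidable (Spec_find_weights f out) := by
  unfold Spec_find_weights; infer_instance

-- ===== CLAIM (what is proved, stated in full; the proofs are below) =====
def Claim_equal_find_weights : Prop :=
  ∀ (f : List (List Int)), Dom_find_weights f → Pre_find_weights f →
    Spec_find_weights f (find_weights f)

-- ===== LEMMAS AND PROOFS =====

-- the column sum of f at index i, as read by both ports (out-of-range entries read 0)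
def pvColsum (f : List (List Int)) (i : Nat) : Int :=
  (f.map (fun r => r.getD i 0)).sum

theorem pv_foldl_append {α β : Type} (g : α → β) :
    ∀ (l : List α) (a : List β),
      l.foldl (fun acc x => acc ++ [g x]) a = a ++ l.map g := by
  intro l
  induction l with
  | nil => intro a; simp
  | cons x t ih => intro a; simp [List.foldl, ih]

theorem pv_foldl_add_map {α : Type} (g : α → Int) :
    ∀ (l : List α) (s0 : Int),
      l.foldl (fun s x => s + g x) s0 = s0 + (l.map g).sum := by
  intro l
  induction l with
  | nil => intro s0; simp
  | cons x t ih => intro s0; simp [List.foldl, ih]; ring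

theorem pv_getD_map_range (g : Nat → Int) (w i : Nat) (h : i < w) :
    ((List.range w).map g).getD i 0 = g i := by
  have hl : i < ((List.range w).map g).length := by simpa using h
  rw [List.getD_eq_getElem _ _ hl]
  simp

theorem pv_map_range_getD (f : List (List Int)) (i : Nat) :
    (List.range f.length).map (fun j => (f.getD j []).getD i 0)
      = f.map (fun r => r.getD i 0) := by
  apply List.ext_getElem
  · simp
  · intro n h1 h2
    have h2' : n < f.length := by simpa using h2
    simp only [List.getElem_map, List.getElem_range]
    rw [List.getD_eq_getElem f [] h2']

theorem pv_sums_eq (f : List (List Int)) :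
    (List.range (f.getD 0 []).length).foldl
      (fun sums i =>
        sums ++ [(List.range f.length).foldl
          (fun sm j => sm + (f.getD j []).getD i 0) 0]) []
    = (List.range (f.getD 0 []).length).map (fun i => pvColsum f i) := by
  rw [pv_foldl_append]
  simp only [List.nil_append]
  apply List.map_congr_left
  intro i _
  rw [pv_foldl_add_map (fun j => (f.getD j []).getD i 0)]
  rw [pv_map_range_getD]
  simp [pvColsum]

theorem pv_ports_eq (f : List (List Int))
    (hpre : ∀ i < f.length, f.getD i [] ≠ [] → i < (f.getD 0 []).length) :
    find_weights f = find_weights_alt f := by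
  simp only [find_weights, find_weights_alt]
  rw [pv_sums_eq f]
  rw [pv_foldl_append (fun i => (f.getD i []).foldl
        (fun sm j => sm + j * ((List.range (f.getD 0 []).length).map
          (fun i => pvColsum f i)).getD i 0) 0)]
  simp only [List.nil_append]
  apply List.map_congr_left
  intro i hi
  have hi' : i < f.length := List.mem_range.mp hi
  by_cases hemp : f.getD i [] = []
  · rw [hemp]; simp
  · have hiw : i < (f.getD 0 []).length := hpre i hi' hemp
    rw [pv_foldl_add_map (fun j => j * ((List.range (f.getD 0 []).length).map
          (fun i => pvColsum f i)).getD i 0)]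
    rw [pv_getD_map_range (fun i => pvColsum f i) _ i hiw]
    have hb : (f.getD i []).map (fun x =>
        ((List.range f.length).map (fun k => x * (f.getD k []).getD i 0)).sum)
        = (f.getD i []).map (fun x => x * pvColsum f i) := by
      apply List.map_congr_left
      intro x _
      have : (List.range f.length).map (fun k => x * (f.getD k []).getD i 0)
          = ((List.range f.length).map (fun k => (f.getD k []).getD i 0)).map
              (fun y => x * y) := by
        simp [List.map_map, Function.comp]
      rw [this, pv_map_range_getD f i]
      simp [pvColsum, Function.comp_def, List.sum_map_mul_left]
    rw [hb]
    simp

-- ===== VERDICT (by name: the statement is the Claim_ definition above) =====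
theorem find_weights_spec : Claim_equal_find_weights := by
  intro f _ hpre
  unfold Spec_find_weights
  exact pv_ports_eq f hpre.2.2
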